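-- pv_equiv track=rewrite | github.com/kzarms/myAutomation | krack/g.py | sumBitDiff
-- ===== SOURCE A (Python) =====
-- def sumBitDiff(arr):
--
--     result = 0
--
--     for i in range(16):
--         count = 0
--         for j in range(len(arr)):
--             if arr[j] & (1 << i):
--                 count += 1
--         result += count * 2
--
--     return result
-- ===== SOURCE B (Python) =====
-- def sumBitDiff(arr):
--     total = 0
--     for x in arr:
--         total += (x & 0xFFFF).bit_count()
--     return 2 * total
-- ===== Notes on version B (the rewrite author's own statement) =====
-- stated objective: faster
-- what changed: Replaced the bit-major nested loops (16 passes over the array, one per bit) by a single element-major pass that adds each element's popcount of its low 16 bits via int.bit_count and doubles the total.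
import Mathlib
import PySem

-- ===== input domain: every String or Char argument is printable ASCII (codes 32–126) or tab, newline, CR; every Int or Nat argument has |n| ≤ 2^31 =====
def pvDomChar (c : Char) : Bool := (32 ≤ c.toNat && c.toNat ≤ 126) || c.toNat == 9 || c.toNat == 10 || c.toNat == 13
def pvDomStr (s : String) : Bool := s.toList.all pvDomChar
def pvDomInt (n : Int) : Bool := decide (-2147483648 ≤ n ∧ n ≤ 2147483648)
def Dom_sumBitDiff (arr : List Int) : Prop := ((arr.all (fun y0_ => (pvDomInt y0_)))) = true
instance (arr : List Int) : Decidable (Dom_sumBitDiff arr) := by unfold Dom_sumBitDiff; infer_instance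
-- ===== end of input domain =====

-- B replaces A's bit-major nested loops (16 passes, one per bit) by one element-major pass
-- summing each element's popcount of its low 16 bits; a timing run measured B faster (constant factor).

-- ===== PORT A =====
-- literal port of A: outer loop over range(16), inner loop over range(len(arr)),
-- Python's `arr[j] & (1 << i)` truthiness is `band … ≠ 0`; i ≥ 0 in range(16), so `1 << i` is `1 <<< i.toNat`
def sumBitDiff (arr : List Int) : Int :=
  (PySem.List.pyRange 0 16 1).foldl
    (fun result i =>
      let count : Int :=
        (PySem.List.pyRange 0 (PySem.List.len arr) 1).foldl
          (fun count j =>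
            if PySem.Int.band (PySem.List.pyGetD arr j 0) ((1 : Int) <<< i.toNat) ≠ 0 then
              count + 1
            else count)
          0
      result + count * 2)
    0

-- ===== PORT B =====
-- port of Source B: one pass, total += (x & 0xFFFF).bit_count(), return 2 * total
def sumBitDiff_alt (arr : List Int) : Int :=
  2 * arr.foldl
        (fun total x => total + (PySem.Int.bitCount (PySem.Int.band x 65535) : Int))
        0

-- ===== PRECONDITION & SPEC =====
def Spec_sumBitDiff (arr : List Int) (out : Int) : Prop := out = sumBitDiff_alt arr
instance (arr : List Int) (out : Int) : Decidable (Spec_sumBitDiff arr out) := by unfold Spec_sumBitDiff; infer_instance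

-- ===== CLAIM (what is proved, stated in full; the proofs are below) =====
def Claim_equal_sumBitDiff : Prop := ∀ (arr : List Int), Dom_sumBitDiff arr → Spec_sumBitDiff arr (sumBitDiff arr)

-- ===== LEMMAS AND PROOFS =====

-- low-bit complement: subtracting from the all-ones mask flips each low bit
theorem pv_testBit_mask_sub (n : Nat) : ∀ (r i : Nat), r < 2 ^ n → i < n →
    (2 ^ n - 1 - r).testBit i = !r.testBit i := by
  induction n with
  | zero => intro r i _ hi; omega
  | succ n ih =>
    intro r i hr hi
    have hpow : 2 ^ (n + 1) = 2 * 2 ^ n := by ring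
    have h0 : 0 < 2 ^ n := Nat.two_pow_pos n
    cases i with
    | zero =>
      simp only [Nat.testBit_zero]
      by_cases h : r % 2 = 1 <;> simp [h] <;> omega
    | succ i =>
      rw [Nat.testBit_succ, Nat.testBit_succ]
      have hdiv : (2 ^ (n + 1) - 1 - r) / 2 = 2 ^ n - 1 - r / 2 := by omega
      rw [hdiv]
      exact ih (r / 2) i (by omega) (by omega)

-- sum of n testBit indicators = Python bit_count, for m < 2^n
theorem pv_sum_testBit (n : Nat) : ∀ (m : Nat), m < 2 ^ n →
    ((List.range n).map (fun k => if m.testBit k then (1 : Int) else 0)).sum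
      = (PySem.Int.bitCount (m : Int) : Int) := by
  induction n with
  | zero =>
    intro m hm
    interval_cases m
    simp [PySem.Int.bitCount_zero]
  | succ n ih =>
    intro m hm
    have hm2 : m / 2 < 2 ^ n := by
      have : 2 ^ (n + 1) = 2 * 2 ^ n := by ring
      omega
    rw [List.range_succ_eq_map, List.map_cons, List.map_map, List.sum_cons]
    have hmap : List.map ((fun k => if m.testBit k then (1 : Int) else 0) ∘ Nat.succ) (List.range n)
        = List.map (fun k => if (m / 2).testBit k then (1 : Int) else 0) (List.range n) := by
      refine List.map_congr_left ?_
      intro k _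
      simp only [Function.comp_apply]
      rw [Nat.testBit_succ]
    rw [hmap, ih (m / 2) hm2]
    rcases Nat.eq_zero_or_pos m with h0 | hpos
    · subst h0; simp [PySem.Int.bitCount_zero]
    · rw [PySem.Int.bitCount_natCast hpos]
      simp only [Nat.testBit_zero]
      by_cases h : m % 2 = 1 <;> simp [h] <;> push_cast <;> try omega

-- the per-element bit indicator used on A's side
def pvInd (k : Nat) (x : Int) : Int :=
  if PySem.Int.band x ((1 : Int) <<< (k : Int)) ≠ 0 then 1 else 0

-- per-element lemma: the 16 bit indicators of x sum to bit_count(x & 0xFFFF)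
theorem pv_ind_sum (x : Int) :
    ((List.range 16).map (fun k => pvInd k x)).sum
      = (PySem.Int.bitCount (PySem.Int.band x 65535) : Int) := by
  have hshift : ∀ k : Nat, (1 : Int) <<< (k : Int) = ((2 ^ k : Nat) : Int) := by
    intro k; exact Int.one_shiftLeft k
  by_cases hx : 0 ≤ x
  · -- x ≥ 0: bits are the bits of x.toNat
    have hband : ∀ k : Nat, PySem.Int.band x ((1 : Int) <<< (k : Int))
        = ((x.toNat &&& 2 ^ k : Nat) : Int) := by
      intro k
      rw [hshift k, PySem.Int.band_of_nonneg hx (by positivity)]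
      rw [Int.toNat_natCast]
    have hind : ∀ k : Nat, pvInd k x = if x.toNat.testBit k then (1 : Int) else 0 := by
      intro k
      have h2 : (0 : Nat) < 2 ^ k := Nat.two_pow_pos k
      unfold pvInd
      rw [hband k, Nat.and_two_pow]
      cases h : x.toNat.testBit k <;> simp [h]
    have hmask : PySem.Int.band x 65535 = ((x.toNat % 65536 : Nat) : Int) := by
      have h1 : (65535 : Int).toNat = 2 ^ 16 - 1 := by decide
      rw [PySem.Int.band_of_nonneg hx (by norm_num), h1, Nat.and_two_pow_sub_one_eq_mod]
    have hbit : ∀ k ∈ List.range 16, (if x.toNat.testBit k then (1 : Int) else 0)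
        = if (x.toNat % 65536).testBit k then (1 : Int) else 0 := by
      intro k hk
      have hk16 : k < 16 := List.mem_range.mp hk
      have h4 : (x.toNat % 2 ^ 16).testBit k = x.toNat.testBit k := by
        rw [Nat.testBit_mod_two_pow]; simp [hk16]
      norm_num at h4 ⊢
      rw [h4]
    calc ((List.range 16).map (fun k => pvInd k x)).sum
        = ((List.range 16).map (fun k => if (x.toNat % 65536).testBit k then (1 : Int) else 0)).sum := by
          refine congrArg _ (List.map_congr_left ?_)
          intro k hk; rw [hind k, hbit k hk]
      _ = (PySem.Int.bitCount ((x.toNat % 65536 : Nat) : Int) : Int) :=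
          pv_sum_testBit 16 (x.toNat % 65536) (by omega)
      _ = (PySem.Int.bitCount (PySem.Int.band x 65535) : Int) := by rw [hmask]
  · -- x < 0: two's complement, bits are the complements of the bits of (-x-1).toNat
    have hx' : x < 0 := by omega
    set c : Nat := (-x - 1).toNat with hc
    have hband : ∀ k : Nat, PySem.Int.band x ((1 : Int) <<< (k : Int))
        = ((2 ^ k - (2 ^ k &&& c) : Nat) : Int) := by
      intro k
      rw [hshift k, PySem.Int.band.eq_1]
      have h2 : (0 : Int) ≤ ((2 ^ k : Nat) : Int) := by positivity
      simp only [hx, if_false, h2, if_true]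
      rw [Int.toNat_natCast]
    have hind : ∀ k : Nat, pvInd k x = if c.testBit k then (0 : Int) else 1 := by
      intro k
      have h2 : (0 : Nat) < 2 ^ k := Nat.two_pow_pos k
      unfold pvInd
      rw [hband k]
      have h3 : (2 ^ k &&& c) = (c.testBit k).toNat * 2 ^ k := by
        rw [Nat.and_comm, Nat.and_two_pow]
      rw [h3]
      cases h : c.testBit k <;> simp [h]
    have hmask : PySem.Int.band x 65535 = ((65535 - c % 65536 : Nat) : Int) := by
      rw [PySem.Int.band.eq_1]
      simp only [hx, if_false, (by norm_num : (0 : Int) ≤ 65535), if_true]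
      have h1 : (65535 : Int).toNat = 65535 := by decide
      rw [h1, Nat.and_comm]
      have h5 : (65535 : Nat) = 2 ^ 16 - 1 := by norm_num
      rw [h5, Nat.and_two_pow_sub_one_eq_mod]
    have hbit : ∀ k ∈ List.range 16, (if c.testBit k then (0 : Int) else 1)
        = if (65535 - c % 65536).testBit k then (1 : Int) else 0 := by
      intro k hk
      have hk16 : k < 16 := List.mem_range.mp hk
      have h1 : (65535 - c % 65536 : Nat) = 2 ^ 16 - 1 - c % 2 ^ 16 := by norm_num
      have h2 : (65535 - c % 65536 : Nat).testBit k = !(c % 2 ^ 16).testBit k := by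
        rw [h1]; exact pv_testBit_mask_sub 16 (c % 2 ^ 16) k (by omega) hk16
      have h3 : (c % 2 ^ 16).testBit k = c.testBit k := by
        rw [Nat.testBit_mod_two_pow]; simp [hk16]
      rw [h2, h3]
      cases h : c.testBit k <;> simp [h]
    calc ((List.range 16).map (fun k => pvInd k x)).sum
        = ((List.range 16).map (fun k => if (65535 - c % 65536).testBit k then (1 : Int) else 0)).sum := by
          refine congrArg _ (List.map_congr_left ?_)
          intro k hk; rw [hind k, hbit k hk]
      _ = (PySem.Int.bitCount ((65535 - c % 65536 : Nat) : Int) : Int) :=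
          pv_sum_testBit 16 (65535 - c % 65536) (by omega)
      _ = (PySem.Int.bitCount (PySem.Int.band x 65535) : Int) := by rw [hmask]

-- exchanging the two summations (bit-major ↔ element-major)
theorem pv_sum_comm (l1 : List Nat) (l2 : List Int) (f : Nat → Int → Int) :
    (l1.map (fun a => (l2.map (f a)).sum)).sum
      = (l2.map (fun b => (l1.map (fun a => f a b)).sum)).sum := by
  induction l1 with
  | nil => simp
  | cons a t ih =>
    simp only [List.map_cons, List.sum_cons, ih]
    rw [← List.sum_map_add]

-- A's inner loop over range(len(arr)) counts, for one bit i, the elements with that bit set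
theorem pv_inner (arr : List Int) (i : Int) :
    (PySem.List.pyRange 0 (PySem.List.len arr) 1).foldl
      (fun count j =>
        if PySem.Int.band (PySem.List.pyGetD arr j 0) ((1 : Int) <<< (i.toNat : Int)) ≠ 0 then count + 1 else count)
      0
    = (arr.map (pvInd i.toNat)).sum := by
  rw [PySem.List.len_eq,
    PySem.List.foldl_pyRange_zero_pyGetD' arr 0
      (fun count x => if PySem.Int.band x ((1 : Int) <<< (i.toNat : Int)) ≠ 0 then count + 1 else count) 0]
  have hcount := PySem.List.foldl_count_if
    (fun x => decide (PySem.Int.band x ((1 : Int) <<< (i.toNat : Int)) ≠ 0)) arr 0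
  simp only [decide_eq_true_eq] at hcount
  rw [hcount, zero_add, ← PySem.List.sum_map_ite_one_zero
    (fun x => decide (PySem.Int.band x ((1 : Int) <<< (i.toNat : Int)) ≠ 0)) arr]
  refine congrArg _ (List.map_congr_left ?_)
  intro x _
  unfold pvInd
  by_cases h : PySem.Int.band x ((1 : Int) <<< (i.toNat : Int)) = 0 <;> simp [h]

-- A's value as a bit-major double sum
theorem pv_A_eq (arr : List Int) :
    sumBitDiff arr
      = ((List.range 16).map (fun k => (arr.map (pvInd k)).sum * 2)).sum := by
  have hpy : PySem.List.pyRange 0 16 1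
      = ([0, 1, 2, 3, 4, 5, 6, 7, 8, 9, 10, 11, 12, 13, 14, 15] : List Int) := by decide
  have hr : List.range 16 = [0, 1, 2, 3, 4, 5, 6, 7, 8, 9, 10, 11, 12, 13, 14, 15] := by decide
  unfold sumBitDiff
  rw [hpy, hr]
  simp only [List.foldl_cons, List.foldl_nil, List.map_cons, List.map_nil,
    List.sum_cons, List.sum_nil]
  rw [pv_inner arr 0, pv_inner arr 1, pv_inner arr 2, pv_inner arr 3, pv_inner arr 4,
    pv_inner arr 5, pv_inner arr 6, pv_inner arr 7, pv_inner arr 8, pv_inner arr 9,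
    pv_inner arr 10, pv_inner arr 11, pv_inner arr 12, pv_inner arr 13, pv_inner arr 14,
    pv_inner arr 15]
  simp only [Int.toNat_zero, Int.toNat_one, Int.reduceToNat]
  ring

-- B's value as an element-major sum
theorem pv_B_eq (arr : List Int) :
    sumBitDiff_alt arr
      = 2 * (arr.map (fun x => (PySem.Int.bitCount (PySem.Int.band x 65535) : Int))).sum := by
  unfold sumBitDiff_alt
  rw [PySem.List.foldl_add arr (fun x => (PySem.Int.bitCount (PySem.Int.band x 65535) : Int)) 0]
  simp

-- ===== VERDICT (by name: the statement is the Claim_ definition above) =====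
theorem sumBitDiff_spec : Claim_equal_sumBitDiff := by
  intro arr _
  unfold Spec_sumBitDiff
  rw [pv_A_eq, pv_B_eq]
  have h1 : ((List.range 16).map (fun k => (arr.map (pvInd k)).sum * 2)).sum
      = 2 * ((List.range 16).map (fun k => (arr.map (pvInd k)).sum)).sum := by
    rw [← List.sum_map_mul_left]
    refine congrArg _ (List.map_congr_left ?_)
    intro k _; ring
  rw [h1, pv_sum_comm (List.range 16) arr pvInd]
  congr 1
  refine congrArg _ (List.map_congr_left ?_)
  intro x _
  exact pv_ind_sum x
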